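-- pv_equiv track=rewrite | github.com/nixternal/CodingChallenges | AdventOfCode/2018/25.py | part_one
-- ===== SOURCE A (Python) =====
-- def manhattan(a: tuple, b: tuple) -> int:
--     """Calculate Manhattan distance between two points."""
--     return sum(abs(x - y) for x, y in zip(a, b))
--
-- def find(parent: list[int], x: int) -> int:
--     """Find root with path compression."""
--     if parent[x] != x:
--         parent[x] = find(parent, parent[x])
--     return parent[x]
--
-- def union(parent: list[int], rank: list[int], x: int, y: int) -> None:
--     """Union by rank."""
--     root_x, root_y = find(parent, x), find(parent, y)
--     if root_x == root_y:
--         return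
--
--     if rank[root_x] < rank[root_y]:
--         root_x, root_y = root_y, root_x
--
--     parent[root_y] = root_x
--     if rank[root_x] == rank[root_y]:
--         rank[root_x] += 1
--
-- def part_one(points: list[tuple[int, ...]]) -> int:
--     """Count constellations (connected components with distance <= 3)."""
--     n = len(points)
--     parent = list(range(n))
--     rank = [0] * n
--
--     # Union points that are within distance 3
--     for i, p1 in enumerate(points):
--         for j in range(i + 1, n):
--             if manhattan(p1, points[j]) <= 3:
--                 union(parent, rank, i, j)
--
--     # Count unique roots
--     return sum(i == find(parent, i) for i in range(n))
-- ===== SOURCE B (Python) =====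
-- def dist(a, b):
--     """Manhattan distance between two points."""
--     return sum(abs(x - y) for x, y in zip(a, b))
--
-- def part_one(points):
--     """Count constellations (connected components with distance <= 3)
--     by label merging: start with a distinct label per point, collapse the
--     two labels of every close pair, and count the distinct labels left."""
--     n = len(points)
--     labels = list(range(n))
--     for i in range(n):
--         for j in range(i + 1, n):
--             if dist(points[i], points[j]) <= 3:
--                 li, lj = labels[i], labels[j]
--                 if li != lj:
--                     labels = [li if l == lj else l for l in labels]
--     return len(set(labels))
-- ===== Notes on version B (the rewrite author's own statement) =====
-- stated objective: simpler
-- what changed: Replaced the union-find structure (parent/rank arrays, recursive find with path compression, union by rank, final root-counting pass) by direct label merging: one label per point, relabel the whole label list whenever a close pair has different labels, then count distinct labels.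
import Mathlib
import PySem

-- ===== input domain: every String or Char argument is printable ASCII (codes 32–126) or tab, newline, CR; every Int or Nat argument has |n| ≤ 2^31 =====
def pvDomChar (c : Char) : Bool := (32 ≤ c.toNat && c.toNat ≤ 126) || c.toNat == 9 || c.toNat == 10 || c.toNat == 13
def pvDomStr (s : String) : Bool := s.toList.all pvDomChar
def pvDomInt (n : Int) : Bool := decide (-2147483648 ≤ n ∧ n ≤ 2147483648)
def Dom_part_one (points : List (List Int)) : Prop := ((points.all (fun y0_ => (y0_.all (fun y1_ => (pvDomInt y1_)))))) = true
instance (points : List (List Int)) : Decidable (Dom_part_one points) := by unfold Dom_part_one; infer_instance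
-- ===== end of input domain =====

-- B replaces A's union-find (parent/rank, recursive find with path compression) by plain
-- label merging (relabel the label list at each close pair, count distinct labels): simpler, not faster.

-- ===== PORT A =====
-- manhattan: sum(abs(x - y) for x, y in zip(a, b))
def manhattanA (a b : List Int) : Int :=
  (a.zip b).foldl (fun s xy => s + |xy.1 - xy.2|) 0

-- find with path compression; the mutated parent list is returned with the root.
-- The fuel (first argument) only makes the recursion structural; callers pass the list
-- length, which always suffices for the parent chains part_one builds (proved below),
-- so the fuel-0 branch is never reached.  parent[x] is in range at every call, so
-- List.getD is exact here.
def findA : Nat → List Nat → Nat → List Nat × Nat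
  | 0, p, x => (p, x)
  | f+1, p, x =>
    if p.getD x x = x then (p, x)
    else
      let pr := findA f p (p.getD x x)
      (pr.1.set x pr.2, pr.2)

-- union by rank; the mutated (parent, rank) pair is returned.
def unionA (p rk : List Nat) (x y : Nat) : List Nat × List Nat :=
  let fx := findA p.length p x
  let fy := findA fx.1.length fx.1 y
  if fx.2 = fy.2 then (fy.1, rk)
  else
    let a := if rk.getD fx.2 0 < rk.getD fy.2 0 then fy.2 else fx.2
    let b := if rk.getD fx.2 0 < rk.getD fy.2 0 then fx.2 else fy.2
    (fy.1.set b a, if rk.getD a 0 = rk.getD b 0 then rk.set a (rk.getD a 0 + 1) else rk)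

-- range(i+1, n) = List.range' (i+1) (n - (i+1)); i < n and i < j < n always, so
-- points.getD is exact for the in-range accesses points[i], points[j].
def part_one (points : List (List Int)) : Int :=
  let n := points.length
  let st := (List.range n).foldl
    (fun (st : List Nat × List Nat) i =>
      (List.range' (i+1) (n - (i+1))).foldl
        (fun st j =>
          if manhattanA (points.getD i []) (points.getD j []) ≤ 3 then unionA st.1 st.2 i j
          else st) st)
    (List.range n, List.replicate n 0)
  ((List.range n).foldl
    (fun (acc : Int × List Nat) i =>
      let fr := findA acc.2.length acc.2 i
      (acc.1 + (if i = fr.2 then 1 else 0), fr.1)) (0, st.1)).1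

-- ===== PORT B =====
-- dist: sum(abs(x - y) for x, y in zip(a, b))
def distB (a b : List Int) : Int :=
  (a.zip b).foldl (fun s xy => s + |xy.1 - xy.2|) 0

def part_one_alt (points : List (List Int)) : Int :=
  let n := points.length
  let labels := (List.range n).foldl
    (fun (labels : List Nat) i =>
      (List.range' (i+1) (n - (i+1))).foldl
        (fun labels j =>
          if distB (points.getD i []) (points.getD j []) ≤ 3 then
            let li := labels.getD i 0
            let lj := labels.getD j 0
            if li ≠ lj then labels.map (fun l => if l = lj then li else l) else labels
          else labels) labels)
    (List.range n)
  ((PySem.Set.ofList labels).length : Int)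

-- ===== PRECONDITION & SPEC =====
def Spec_part_one (points : List (List Int)) (out : Int) : Prop := out = part_one_alt points
instance (points : List (List Int)) (out : Int) : Decidable (Spec_part_one points out) := by unfold Spec_part_one; infer_instance

-- ===== CLAIM (what is proved, stated in full; the proofs are below) =====
def Claim_equal_part_one : Prop := ∀ (points : List (List Int)), Dom_part_one points → Spec_part_one points (part_one points)

-- ===== LEMMAS AND PROOFS =====

-- The proof-only theory of parent forests: step/iter/root reachability.
def pvStep (p : List Nat) (z : Nat) : Nat := p.getD z z
def pvIter (p : List Nat) : Nat → Nat → Nat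
  | 0, z => z
  | k+1, z => pvIter p k (pvStep p z)
def pvRoot (p : List Nat) (z : Nat) : Prop := pvStep p z = z
-- z reaches root r
def pvR (p : List Nat) (z r : Nat) : Prop := ∃ k, pvIter p k z = r ∧ pvRoot p r
-- z and w are in the same tree
def pvEq (p : List Nat) (z w : Nat) : Prop := ∃ r, pvR p z r ∧ pvR p w r

def pvBound (p : List Nat) : Prop := ∀ x, x < p.length → p.getD x x < p.length
def pvReaches (p : List Nat) : Prop := ∀ z, ∃ r, pvR p z r

theorem pvIter_succ (p : List Nat) (k z : Nat) : pvIter p (k+1) z = pvIter p k (pvStep p z) := rfl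

theorem pvIter_add (p : List Nat) (a b z : Nat) : pvIter p (a + b) z = pvIter p b (pvIter p a z) := by
  induction a generalizing z with
  | zero => simp [pvIter]
  | succ a ih => rw [Nat.succ_add, pvIter_succ, ih, pvIter_succ]

theorem pvIter_root (p : List Nat) {r : Nat} (h : pvRoot p r) (k : Nat) : pvIter p k r = r := by
  induction k with
  | zero => rfl
  | succ k ih => rw [pvIter_succ, h, ih]

theorem pvR_unique_le {p : List Nat} {z r r' k k' : Nat} (hle : k ≤ k')
    (hk : pvIter p k z = r) (hr : pvRoot p r) (hk' : pvIter p k' z = r') : r = r' := by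
  obtain ⟨d, rfl⟩ := Nat.le.dest hle
  rw [pvIter_add, hk, pvIter_root p hr] at hk'
  exact hk'

theorem pvR_unique {p : List Nat} {z r r' : Nat} (h : pvR p z r) (h' : pvR p z r') : r = r' := by
  obtain ⟨k, hk, hr⟩ := h
  obtain ⟨k', hk', hr'⟩ := h'
  rcases Nat.le_total k k' with hle | hle
  · exact pvR_unique_le hle hk hr hk'
  · exact (pvR_unique_le hle hk' hr' hk).symm

theorem pvR_root {p : List Nat} {z : Nat} (h : pvRoot p z) : pvR p z z := ⟨0, rfl, h⟩

theorem pvR_self_iff {p : List Nat} {z : Nat} : pvR p z z ↔ pvRoot p z := by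
  constructor
  · rintro ⟨k, -, hr⟩; exact hr
  · exact pvR_root

theorem pvR_step {p : List Nat} {z r : Nat} (h : pvR p (pvStep p z) r) : pvR p z r := by
  obtain ⟨k, hk, hr⟩ := h
  exact ⟨k+1, by rw [pvIter_succ]; exact hk, hr⟩

theorem pvStep_lt {p : List Nat} (hB : pvBound p) {z : Nat} (hz : z < p.length) :
    pvStep p z < p.length := hB z hz

theorem pvIter_lt {p : List Nat} (hB : pvBound p) {z : Nat} (hz : z < p.length) (k : Nat) :
    pvIter p k z < p.length := by
  induction k generalizing z with
  | zero => exact hz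
  | succ k ih => rw [pvIter_succ]; exact ih (pvStep_lt hB hz)

theorem pvR_lt {p : List Nat} (hB : pvBound p) {z r : Nat} (hz : z < p.length) (h : pvR p z r) :
    r < p.length := by
  obtain ⟨k, hk, _⟩ := h
  exact hk ▸ pvIter_lt hB hz k

-- a minimal witness for an arbitrary ℕ-predicate (classical, no decidability needed)
theorem pv_exists_min {P : Nat → Prop} (h : ∃ k, P k) : ∃ k, P k ∧ ∀ j < k, ¬ P j := by
  obtain ⟨k, hk⟩ := h
  induction k using Nat.strong_induction_on with
  | _ k ih =>
    by_cases h' : ∃ j, j < k ∧ P j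
    · obtain ⟨j, hj, hPj⟩ := h'
      exact ih j hj hPj
    · exact ⟨k, hk, fun j hj hPj => h' ⟨j, hj, hPj⟩⟩

-- chains reach a root within p.length steps
theorem pv_minchain {p : List Nat} (hB : pvBound p) (hRe : pvReaches p) {x : Nat}
    (hx : x < p.length) : ∃ k ≤ p.length, pvRoot p (pvIter p k x) := by
  obtain ⟨r, kr, hkr, hroot⟩ := hRe x
  obtain ⟨k, hk, hmin⟩ := pv_exists_min (P := fun k => pvRoot p (pvIter p k x)) ⟨kr, by show pvRoot p (pvIter p kr x); rw [hkr]; exact hroot⟩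
  refine ⟨k, ?_, hk⟩
  -- injectivity of i ↦ pvIter p i x on [0, k]
  have hinj : ∀ i j, i ≤ k → j ≤ k → pvIter p i x = pvIter p j x → i = j := by
    have key : ∀ i j, i < j → j ≤ k → pvIter p i x = pvIter p j x → False := by
      intro i j hij hjk heq
      have hper : ∀ t, pvIter p (i + t * (j - i)) x = pvIter p i x := by
        intro t
        induction t with
        | zero => simp
        | succ t ih =>
          have h1 : i + (t+1) * (j - i) = (i + t * (j -i)) + (j - i) := by ring
          have h2 : i + (j - i) = j := by omega
          rw [h1, pvIter_add, ih, ← pvIter_add, h2, ← heq]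
      -- iterate k times the period to pass k
      have hge : i + k * (j - i) ≥ k := by
        have : j - i ≥ 1 := by omega
        calc k ≤ k * (j-i) := Nat.le_mul_of_pos_right k (by omega)
          _ ≤ i + k * (j-i) := by omega
      obtain ⟨d, hd⟩ := Nat.le.dest hge
      have : pvIter p (i + k * (j-i)) x = pvIter p i x := hper k
      rw [← hd, pvIter_add, pvIter_root p hk d] at this
      exact hmin i (by omega) (by rw [← this]; exact hk)
    intro i j hi hj heq
    rcases Nat.lt_trichotomy i j with h | h | h
    · exact absurd heq (fun e => key i j h hj e)
    · exact h
    · exact absurd heq.symm (fun e => key j i h hi e)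
  by_contra hnk
  have hmaps : ∀ i ∈ Finset.range (k+1), pvIter p i x ∈ Finset.range p.length := by
    intro i _
    exact Finset.mem_range.mpr (pvIter_lt hB hx i)
  have hinj' : Set.InjOn (fun i => pvIter p i x) (Finset.range (k+1)) := by
    intro i hi j hj heq
    exact hinj i j (by simpa using Finset.mem_coe.mp hi) (by simpa using Finset.mem_coe.mp hj) heq
  have := Finset.card_le_card_of_injOn _ hmaps hinj'
  simp only [Finset.card_range] at this
  omega

theorem pvStep_set {p : List Nat} {x : Nat} (hx : x < p.length) (r z : Nat) :
    pvStep (p.set x r) z = if z = x then r else pvStep p z := by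
  by_cases h : z = x
  · subst h
    simp [pvStep, List.getD_eq_getElem?_getD, hx]
  · simp [pvStep, List.getD_eq_getElem?_getD, h, Ne.symm h]

theorem pvR_ext {p q : List Nat} (h : ∀ z, pvStep p z = pvStep q z) (z r : Nat) :
    pvR p z r ↔ pvR q z r := by
  have hiter : ∀ k z, pvIter p k z = pvIter q k z := by
    intro k
    induction k with
    | zero => intro z; rfl
    | succ k ih => intro z; rw [pvIter_succ, pvIter_succ, h, ih]
  have hroot : ∀ z, pvRoot p z ↔ pvRoot q z := fun z => by rw [pvRoot, pvRoot, h]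
  constructor
  · rintro ⟨k, hk, hr⟩; exact ⟨k, by rw [← hiter]; exact hk, (hroot r).mp hr⟩
  · rintro ⟨k, hk, hr⟩; exact ⟨k, by rw [hiter]; exact hk, (hroot r).mpr hr⟩

-- setting a node's parent to its own root (path compression) changes no root
theorem pvSet_R_iff {p : List Nat} {x r : Nat} (hx : x < p.length) (hRx : pvR p x r)
    (z a : Nat) : pvR (p.set x r) z a ↔ pvR p z a := by
  by_cases hxr : r = x
  · subst hxr
    have hroot : pvRoot p r := pvR_self_iff.mp hRx
    have hstep : ∀ z, pvStep (p.set r r) z = pvStep p z := by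
      intro z
      rw [pvStep_set hx]
      by_cases h : z = r
      · subst h; rw [if_pos rfl, hroot]
      · rw [if_neg h]
    exact pvR_ext hstep z a
  · have hrx : ¬ pvRoot p x := fun h => hxr (pvR_unique hRx (pvR_root h))
    have hrootr : pvRoot p r := by obtain ⟨-, -, h⟩ := hRx; exact h
    have hstep : ∀ z, pvStep (p.set x r) z = if z = x then r else pvStep p z := pvStep_set hx r
    have hrootq_r : pvRoot (p.set x r) r := by
      rw [pvRoot, hstep, if_neg hxr]; exact hrootr
    have fwd : ∀ k z, pvRoot p (pvIter p k z) → pvR (p.set x r) z (pvIter p k z) := by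
      intro k
      induction k with
      | zero =>
        intro z h
        by_cases hzx : z = x
        · exact absurd (hzx ▸ h) hrx
        · exact pvR_root (by rw [pvRoot, hstep, if_neg hzx]; exact h)
      | succ k ih =>
        intro z h
        by_cases hzx : z = x
        · subst hzx
          have : pvIter p (k+1) z = r := pvR_unique ⟨k+1, rfl, h⟩ hRx
          rw [this]
          exact ⟨1, by show pvStep (p.set z r) z = r; rw [hstep, if_pos rfl], hrootq_r⟩
        · by_cases hz : pvRoot p z
          · rw [pvIter_root p hz]
            exact pvR_root (by rw [pvRoot, hstep, if_neg hzx]; exact hz)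
          · rw [pvIter_succ] at h ⊢
            have := ih (pvStep p z) h
            have hstepz : pvStep (p.set x r) z = pvStep p z := by rw [hstep, if_neg hzx]
            exact pvR_step (by rw [hstepz]; exact this)
    have bwd : ∀ k z, pvRoot (p.set x r) (pvIter (p.set x r) k z) → pvR p z (pvIter (p.set x r) k z) := by
      intro k
      induction k with
      | zero =>
        intro z h
        simp only [pvIter] at h ⊢
        by_cases hzx : z = x
        · subst hzx
          have : pvStep (p.set z r) z = r := by rw [hstep, if_pos rfl]
          exact absurd (by rw [pvRoot, this] at h; exact h) hxr
        · exact pvR_root (by rw [pvRoot, hstep, if_neg hzx] at h; exact h)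
      | succ k ih =>
        intro z h
        by_cases hzx : z = x
        · subst hzx
          have hq : pvR (p.set z r) z r := ⟨1, by show pvStep (p.set z r) z = r; rw [hstep, if_pos rfl], hrootq_r⟩
          have : pvIter (p.set z r) (k+1) z = r := pvR_unique ⟨k+1, rfl, h⟩ hq
          rw [this]; exact hRx
        · by_cases hz : pvRoot (p.set x r) z
          · rw [pvIter_root _ hz]
            exact pvR_root (by rw [pvRoot, hstep, if_neg hzx] at hz; exact hz)
          · rw [pvIter_succ] at h ⊢
            have hstepz : pvStep (p.set x r) z = pvStep p z := by rw [hstep, if_neg hzx]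
            rw [hstepz] at h ⊢
            exact pvR_step (ih (pvStep p z) h)
    constructor
    · rintro ⟨k, hk, hr⟩
      have := bwd k z (by rw [hk]; exact hr)
      rw [hk] at this; exact this
    · rintro ⟨k, hk, hr⟩
      have := fwd k z (by rw [hk]; exact hr)
      rw [hk] at this; exact this

theorem pvSet_Bound {p : List Nat} {x r : Nat} (hB : pvBound p) (hr : r < p.length) :
    pvBound (p.set x r) := by
  intro z hz
  rw [List.length_set] at hz ⊢
  show pvStep (p.set x r) z < p.length
  by_cases hx : x < p.length
  · rw [pvStep_set hx r z]
    split
    · exact hr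
    · exact hB z hz
  · rw [List.set_eq_of_length_le (by omega)]
    exact hB z hz

theorem pvSet_Reaches {p : List Nat} {x r : Nat} (hx : x < p.length) (hRx : pvR p x r)
    (hRe : pvReaches p) : pvReaches (p.set x r) := by
  intro z
  obtain ⟨a, ha⟩ := hRe z
  exact ⟨a, (pvSet_R_iff hx hRx z a).mpr ha⟩

-- find returns the root and only compresses paths: no pvR fact changes
theorem findA_spec : ∀ (f : Nat) (p : List Nat) (x : Nat), pvBound p → pvReaches p → x < p.length →
    (∃ k, k ≤ f ∧ pvRoot p (pvIter p k x)) →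
    (findA f p x).1.length = p.length ∧ pvBound (findA f p x).1 ∧ pvReaches (findA f p x).1 ∧
    (∀ z a, pvR (findA f p x).1 z a ↔ pvR p z a) ∧ pvR p x (findA f p x).2 := by
  intro f
  induction f with
  | zero =>
    intro p x hB hRe hx hch
    obtain ⟨k, hk, hr⟩ := hch
    have hk0 : k = 0 := by omega
    subst hk0
    exact ⟨rfl, hB, hRe, fun z a => Iff.rfl, pvR_root hr⟩
  | succ f ih =>
    intro p x hB hRe hx hch
    by_cases hroot : p.getD x x = x
    · have hfx : findA (f+1) p x = (p, x) := by
        simp only [findA]; rw [if_pos hroot]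
      rw [hfx]
      exact ⟨rfl, hB, hRe, fun z a => Iff.rfl, pvR_root hroot⟩
    · have hfx : findA (f+1) p x =
          ((findA f p (p.getD x x)).1.set x (findA f p (p.getD x x)).2, (findA f p (p.getD x x)).2) := by
        simp only [findA]; rw [if_neg hroot]
      have hpxlt : p.getD x x < p.length := pvStep_lt hB hx
      have hch' : ∃ k, k ≤ f ∧ pvRoot p (pvIter p k (p.getD x x)) := by
        obtain ⟨k, hk, hr⟩ := hch
        cases k with
        | zero => exact absurd hr hroot
        | succ k => exact ⟨k, by omega, hr⟩
      obtain ⟨hlen, hB1, hRe1, hiff, hRr⟩ := ih p (p.getD x x) hB hRe hpxlt hch'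
      have hRxr : pvR p x (findA f p (p.getD x x)).2 := pvR_step hRr
      have hx1 : x < (findA f p (p.getD x x)).1.length := by rw [hlen]; exact hx
      have hR1x : pvR (findA f p (p.getD x x)).1 x (findA f p (p.getD x x)).2 :=
        (hiff x _).mpr hRxr
      have hrlt : (findA f p (p.getD x x)).2 < (findA f p (p.getD x x)).1.length :=
        pvR_lt hB1 hx1 hR1x
      rw [hfx]
      refine ⟨by rw [List.length_set, hlen], pvSet_Bound hB1 hrlt,
        pvSet_Reaches hx1 hR1x hRe1, fun z a => ?_, hRxr⟩
      rw [pvSet_R_iff hx1 hR1x z a, hiff z a]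

theorem pvEq_congr {p q : List Nat} (h : ∀ z a, pvR p z a ↔ pvR q z a) (z w : Nat) :
    pvEq p z w ↔ pvEq q z w := by
  constructor
  · rintro ⟨r, hz, hw⟩; exact ⟨r, (h z r).mp hz, (h w r).mp hw⟩
  · rintro ⟨r, hz, hw⟩; exact ⟨r, (h z r).mpr hz, (h w r).mpr hw⟩

theorem pvEq_symm {p : List Nat} {z w : Nat} (h : pvEq p z w) : pvEq p w z := by
  obtain ⟨r, hz, hw⟩ := h; exact ⟨r, hw, hz⟩

theorem pvEq_trans {p : List Nat} {z w v : Nat} (h : pvEq p z w) (h' : pvEq p w v) : pvEq p z v := by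
  obtain ⟨r, hz, hw⟩ := h
  obtain ⟨r', hw', hv⟩ := h'
  exact ⟨r, hz, (pvR_unique hw' hw) ▸ hv⟩

theorem pvR_of_pvEq {p : List Nat} {z x rx : Nat} (h : pvEq p z x) (hx : pvR p x rx) :
    pvR p z rx := by
  obtain ⟨r, hz, hx'⟩ := h
  exact (pvR_unique hx' hx) ▸ hz

-- linking two roots a ≠ b (union): every root b becomes a, nothing else changes
theorem pvMerge_R {p : List Nat} {a b : Nat} (hb : b < p.length) (ha' : pvRoot p a)
    (hb' : pvRoot p b) (hab : a ≠ b) (z r0 : Nat) :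
    pvR (p.set b a) z r0 ↔ ((pvR p z r0 ∧ r0 ≠ b) ∨ (pvR p z b ∧ r0 = a)) := by
  have hstep : ∀ z, pvStep (p.set b a) z = if z = b then a else pvStep p z := pvStep_set hb a
  have hroota_q : pvRoot (p.set b a) a := by rw [pvRoot, hstep, if_neg hab]; exact ha'
  have hRqba : pvR (p.set b a) b a :=
    ⟨1, by show pvStep (p.set b a) b = a; rw [hstep, if_pos rfl], hroota_q⟩
  have base : ∀ z, pvRoot p z → pvR (p.set b a) z (if z = b then a else z) := by
    intro z h
    by_cases hzb : z = b
    · subst hzb; rw [if_pos rfl]; exact hRqba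
    · rw [if_neg hzb]
      exact pvR_root (by rw [pvRoot, hstep, if_neg hzb]; exact h)
  have fwd : ∀ k z, pvRoot p (pvIter p k z) →
      pvR (p.set b a) z (if pvIter p k z = b then a else pvIter p k z) := by
    intro k
    induction k with
    | zero => exact fun z h => base z h
    | succ k ih =>
      intro z h
      by_cases hz : pvRoot p z
      · rw [pvIter_root p hz]
        exact base z hz
      · have hzb : z ≠ b := fun e => hz (e ▸ hb')
        have h1 : pvStep (p.set b a) z = pvStep p z := by rw [hstep, if_neg hzb]
        apply pvR_step
        rw [h1]
        exact ih (pvStep p z) h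
  have bwd : ∀ k z, pvRoot (p.set b a) (pvIter (p.set b a) k z) →
      ((pvR p z (pvIter (p.set b a) k z) ∧ pvIter (p.set b a) k z ≠ b) ∨
       (pvR p z b ∧ pvIter (p.set b a) k z = a)) := by
    intro k
    induction k with
    | zero =>
      intro z h
      simp only [pvIter] at h ⊢
      by_cases hzb : z = b
      · subst hzb
        rw [pvRoot, hstep, if_pos rfl] at h
        exact absurd h hab
      · rw [pvRoot, hstep, if_neg hzb] at h
        exact Or.inl ⟨pvR_root h, hzb⟩
    | succ k ih =>
      intro z h
      by_cases hz : pvRoot (p.set b a) z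
      · rw [pvIter_root _ hz] at *
        by_cases hzb : z = b
        · subst hzb
          rw [pvRoot, hstep, if_pos rfl] at hz
          exact absurd hz hab
        · rw [pvRoot, hstep, if_neg hzb] at hz
          exact Or.inl ⟨pvR_root hz, hzb⟩
      · by_cases hzb : z = b
        · have hz_a : pvR (p.set b a) z a := by rw [hzb]; exact hRqba
          have heq : pvIter (p.set b a) (k+1) z = a := pvR_unique ⟨k+1, rfl, h⟩ hz_a
          rw [heq]
          exact Or.inr ⟨by rw [hzb]; exact pvR_root hb', rfl⟩
        · have h1 : pvStep (p.set b a) z = pvStep p z := by rw [hstep, if_neg hzb]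
          rw [pvIter_succ, h1] at h ⊢
          rcases ih (pvStep p z) h with ⟨hR, hne⟩ | ⟨hR, heq⟩
          · exact Or.inl ⟨pvR_step hR, hne⟩
          · exact Or.inr ⟨pvR_step hR, heq⟩
  constructor
  · rintro ⟨k, hk, hr⟩
    have := bwd k z (by rw [hk]; exact hr)
    rwa [hk] at this
  · rintro (⟨⟨k, hk, hr⟩, hne⟩ | ⟨⟨k, hk, hr⟩, rfl⟩)
    · have := fwd k z (by rw [hk]; exact hr)
      rwa [hk, if_neg hne] at this
    · have := fwd k z (by rw [hk]; exact hr)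
      rwa [hk, if_pos rfl] at this

-- union merges exactly the classes of x and y
theorem unionA_spec (p rk : List Nat) (x y : Nat) (hB : pvBound p) (hRe : pvReaches p)
    (hx : x < p.length) (hy : y < p.length) :
    (unionA p rk x y).1.length = p.length ∧ pvBound (unionA p rk x y).1 ∧
    pvReaches (unionA p rk x y).1 ∧
    (∀ z w, pvEq (unionA p rk x y).1 z w ↔
      (pvEq p z w ∨ ((pvEq p z x ∨ pvEq p z y) ∧ (pvEq p w x ∨ pvEq p w y)))) := by
  obtain ⟨hlen1, hB1, hRe1, hiff1, hRx⟩ :=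
    findA_spec p.length p x hB hRe hx (pv_minchain hB hRe hx)
  have hy1 : y < (findA p.length p x).1.length := by rw [hlen1]; exact hy
  obtain ⟨hlen2, hB2, hRe2, hiff2, hRy1⟩ :=
    findA_spec (findA p.length p x).1.length (findA p.length p x).1 y hB1 hRe1 hy1
      (pv_minchain hB1 hRe1 hy1)
  have hPiff : ∀ z a, pvR (findA (findA p.length p x).1.length (findA p.length p x).1 y).1 z a ↔ pvR p z a :=
    fun z a => (hiff2 z a).trans (hiff1 z a)
  set rx := (findA p.length p x).2 with hrxdef
  set p1 := (findA p.length p x).1 with hp1def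
  set ry := (findA p1.length p1 y).2 with hrydef
  set p2 := (findA p1.length p1 y).1 with hp2def
  have hRy : pvR p y ry := (hiff1 y ry).mp hRy1
  have hlen2' : p2.length = p.length := by rw [hlen2, hlen1]
  have hrootrx : pvRoot p rx := by obtain ⟨-, -, h⟩ := hRx; exact h
  have hrootry : pvRoot p ry := by obtain ⟨-, -, h⟩ := hRy; exact h
  have hrxlt : rx < p.length := pvR_lt hB hx hRx
  have hrylt : ry < p.length := pvR_lt hB hy hRy
  have hclassx : ∀ z, pvR p z rx → pvEq p z x := fun z h => ⟨rx, h, hRx⟩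
  have hclassy : ∀ z, pvR p z ry → pvEq p z y := fun z h => ⟨ry, h, hRy⟩
  by_cases hrr : rx = ry
  · have hu : unionA p rk x y = (p2, rk) := by
      simp only [unionA]
      rw [← hp1def, ← hrxdef, ← hp2def, ← hrydef, if_pos hrr]
    rw [hu]
    refine ⟨hlen2', hB2, hRe2, fun z w => ?_⟩
    rw [pvEq_congr hPiff z w]
    constructor
    · exact Or.inl
    · rintro (h | ⟨hz, hw⟩)
      · exact h
      · have hxyE : pvEq p x y := ⟨rx, hRx, hrr ▸ hRy⟩
        have hz' : pvEq p z x := hz.elim id (fun h => pvEq_trans h (pvEq_symm hxyE))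
        have hw' : pvEq p w x := hw.elim id (fun h => pvEq_trans h (pvEq_symm hxyE))
        exact pvEq_trans hz' (pvEq_symm hw')
  · set c := rk.getD rx 0 < rk.getD ry 0 with hcdef
    set aa := if c then ry else rx with haadef
    set bb := if c then rx else ry with hbbdef
    have hu : (unionA p rk x y).1 = p2.set bb aa := by
      simp only [unionA]
      rw [← hp1def, ← hrxdef, ← hp2def, ← hrydef, if_neg hrr]
    have hab : aa ≠ bb := by
      rw [haadef, hbbdef]
      split
      · exact Ne.symm hrr
      · exact hrr
    have haaor : aa = rx ∨ aa = ry := by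
      rw [haadef]
      split
      · exact Or.inr rfl
      · exact Or.inl rfl
    have hbbor : bb = rx ∨ bb = ry := by
      rw [hbbdef]
      split
      · exact Or.inl rfl
      · exact Or.inr rfl
    have haroot : pvRoot p aa := haaor.elim (fun h => h ▸ hrootrx) (fun h => h ▸ hrootry)
    have hbroot : pvRoot p bb := hbbor.elim (fun h => h ▸ hrootrx) (fun h => h ▸ hrootry)
    have haroot2 : pvRoot p2 aa := pvR_self_iff.mp ((hPiff aa aa).mpr (pvR_root haroot))
    have hbroot2 : pvRoot p2 bb := pvR_self_iff.mp ((hPiff bb bb).mpr (pvR_root hbroot))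
    have halt : aa < p.length := haaor.elim (fun h => h ▸ hrxlt) (fun h => h ▸ hrylt)
    have hblt : bb < p2.length := by rw [hlen2']; exact hbbor.elim (fun h => h ▸ hrxlt) (fun h => h ▸ hrylt)
    have char : ∀ z r0, pvR (p2.set bb aa) z r0 ↔ ((pvR p z r0 ∧ r0 ≠ bb) ∨ (pvR p z bb ∧ r0 = aa)) := by
      intro z r0
      rw [pvMerge_R hblt haroot2 hbroot2 hab z r0]
      constructor
      · rintro (⟨h, hne⟩ | ⟨h, he⟩)
        · exact Or.inl ⟨(hPiff z r0).mp h, hne⟩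
        · exact Or.inr ⟨(hPiff z bb).mp h, he⟩
      · rintro (⟨h, hne⟩ | ⟨h, he⟩)
        · exact Or.inl ⟨(hPiff z r0).mpr h, hne⟩
        · exact Or.inr ⟨(hPiff z bb).mpr h, he⟩
    have hqR : ∀ z ρ, pvR p z ρ → pvR (p2.set bb aa) z (if ρ = bb then aa else ρ) := by
      intro z ρ h
      by_cases he : ρ = bb
      · rw [if_pos he]
        exact (char z aa).mpr (Or.inr ⟨he ▸ h, rfl⟩)
      · rw [if_neg he]
        exact (char z ρ).mpr (Or.inl ⟨h, he⟩)
    have hcollapse : ∀ r, (r = rx ∨ r = ry) → (if r = bb then aa else r) = aa := by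
      intro r hr
      by_cases he : r = bb
      · rw [if_pos he]
      · rw [if_neg he]
        rcases haaor with ha1 | ha1 <;> rcases hbbor with hb1 | hb1 <;> rcases hr with rfl | rfl <;>
          first
          | exact ha1.symm
          | exact absurd (ha1.trans hb1.symm) hab
          | exact absurd hb1.symm he
    rw [hu]
    refine ⟨by rw [List.length_set, hlen2'], pvSet_Bound (by rw [hu] at *; exact hB2) (by rw [hlen2']; exact halt), ?_, ?_⟩
    · intro z
      obtain ⟨ρ, hρ⟩ := hRe z
      exact ⟨_, hqR z ρ hρ⟩
    · intro z w
      constructor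
      · rintro ⟨r0, hz0, hw0⟩
        rcases (char z r0).mp hz0 with ⟨hz', hne⟩ | ⟨hz', he⟩ <;>
          rcases (char w r0).mp hw0 with ⟨hw', hne'⟩ | ⟨hw', he'⟩
        · exact Or.inl ⟨r0, hz', hw'⟩
        · subst he'
          refine Or.inr ⟨?_, ?_⟩
          · rcases haaor with h | h
            · exact Or.inl (hclassx z (h ▸ hz'))
            · exact Or.inr (hclassy z (h ▸ hz'))
          · rcases hbbor with h | h
            · exact Or.inl (hclassx w (h ▸ hw'))
            · exact Or.inr (hclassy w (h ▸ hw'))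
        · subst he
          refine Or.inr ⟨?_, ?_⟩
          · rcases hbbor with h | h
            · exact Or.inl (hclassx z (h ▸ hz'))
            · exact Or.inr (hclassy z (h ▸ hz'))
          · rcases haaor with h | h
            · exact Or.inl (hclassx w (h ▸ hw'))
            · exact Or.inr (hclassy w (h ▸ hw'))
        · exact Or.inl ⟨bb, hz', hw'⟩
      · rintro (⟨r0, hz0, hw0⟩ | ⟨hz', hw'⟩)
        · exact ⟨_, hqR z r0 hz0, hqR w r0 hw0⟩
        · have hzroot : pvR p z rx ∨ pvR p z ry := by
            rcases hz' with h | h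
            · exact Or.inl (pvR_of_pvEq h hRx)
            · exact Or.inr (pvR_of_pvEq h hRy)
          have hwroot : pvR p w rx ∨ pvR p w ry := by
            rcases hw' with h | h
            · exact Or.inl (pvR_of_pvEq h hRx)
            · exact Or.inr (pvR_of_pvEq h hRy)
          refine ⟨aa, ?_, ?_⟩
          · rcases hzroot with h | h
            · have := hqR z rx h; rwa [hcollapse rx (Or.inl rfl)] at this
            · have := hqR z ry h; rwa [hcollapse ry (Or.inr rfl)] at this
          · rcases hwroot with h | h
            · have := hqR w rx h; rwa [hcollapse rx (Or.inl rfl)] at this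
            · have := hqR w ry h; rwa [hcollapse ry (Or.inr rfl)] at this

-- joint invariant: A's forest and B's label list induce the same partition of [0, n)
def pvJ (n : Nat) (p labels : List Nat) : Prop :=
  p.length = n ∧ labels.length = n ∧ pvBound p ∧ pvReaches p ∧
  ∀ z w, z < n → w < n → (pvEq p z w ↔ labels.getD z 0 = labels.getD w 0)

theorem getD_map_zero (labels : List Nat) (g : Nat → Nat) {z : Nat} (hz : z < labels.length) :
    (labels.map g).getD z 0 = g (labels.getD z 0) := by
  rw [List.getD_eq_getElem _ _ (by simpa using hz), List.getD_eq_getElem _ _ hz, List.getElem_map]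

theorem collapse_eq_iff {li lj u v : Nat} :
    ((if u = lj then li else u) = (if v = lj then li else v)) ↔
      (u = v ∨ ((u = li ∨ u = lj) ∧ (v = li ∨ v = lj))) := by
  split_ifs <;> omega

theorem pvEdge (n : Nat) (p rk labels : List Nat) (i j : Nat) (hi : i < n) (hj : j < n)
    (hJ : pvJ n p labels) :
    pvJ n (unionA p rk i j).1
      (if labels.getD i 0 ≠ labels.getD j 0 then
        labels.map (fun l => if l = labels.getD j 0 then labels.getD i 0 else l)
      else labels) := by
  obtain ⟨hpl, hll, hB, hRe, hinv⟩ := hJ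
  obtain ⟨hlen', hB', hRe', hchar⟩ :=
    unionA_spec p rk i j hB hRe (by rw [hpl]; exact hi) (by rw [hpl]; exact hj)
  by_cases hij : labels.getD i 0 = labels.getD j 0
  · rw [if_neg (by simpa using hij)]
    refine ⟨by rw [hlen', hpl], hll, hB', hRe', fun z w hz hw => ?_⟩
    rw [hchar z w, ← hinv z w hz hw]
    constructor
    · rintro (h | ⟨hzc, hwc⟩)
      · exact h
      · have hxyE : pvEq p i j := (hinv i j hi hj).mpr hij
        have hz' : pvEq p z i := hzc.elim id (fun h => pvEq_trans h (pvEq_symm hxyE))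
        have hw' : pvEq p w i := hwc.elim id (fun h => pvEq_trans h (pvEq_symm hxyE))
        exact pvEq_trans hz' (pvEq_symm hw')
    · exact Or.inl
  · rw [if_pos hij]
    refine ⟨by rw [hlen', hpl], by rw [List.length_map]; exact hll, hB', hRe', fun z w hz hw => ?_⟩
    rw [hchar z w,
      getD_map_zero labels _ (by rw [hll]; exact hz),
      getD_map_zero labels _ (by rw [hll]; exact hw),
      collapse_eq_iff, ← hinv z w hz hw, ← hinv z i hz hi, ← hinv z j hz hj,
      ← hinv w i hw hi, ← hinv w j hw hj]

theorem pvInner (points : List (List Int)) (n : Nat) (i : Nat) :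
    ∀ (js : List Nat) (st : List Nat × List Nat) (labels : List Nat),
      (∀ j ∈ js, j < n) → i < n → pvJ n st.1 labels →
    pvJ n
      ((js.foldl (fun st j =>
          if manhattanA (points.getD i []) (points.getD j []) ≤ 3 then unionA st.1 st.2 i j
          else st) st).1)
      (js.foldl (fun labels j =>
          if distB (points.getD i []) (points.getD j []) ≤ 3 then
            let li := labels.getD i 0
            let lj := labels.getD j 0
            if li ≠ lj then labels.map (fun l => if l = lj then li else l) else labels
          else labels) labels) := by
  intro js
  induction js with
  | nil => intro st labels _ _ hJ; exact hJ
  | cons j js ih =>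
    intro st labels hmem hi hJ
    simp only [List.foldl_cons]
    by_cases hc : manhattanA (points.getD i []) (points.getD j []) ≤ 3
    · rw [if_pos hc, if_pos (show distB (points.getD i []) (points.getD j []) ≤ 3 from hc)]
      exact ih _ _ (fun j' h => hmem j' (List.mem_cons_of_mem j h)) hi
        (pvEdge n st.1 st.2 labels i j hi (hmem j List.mem_cons_self) hJ)
    · rw [if_neg hc, if_neg (show ¬ distB (points.getD i []) (points.getD j []) ≤ 3 from hc)]
      exact ih _ _ (fun j' h => hmem j' (List.mem_cons_of_mem j h)) hi hJ

theorem pvOuter (points : List (List Int)) (n : Nat) :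
    ∀ (is : List Nat) (st : List Nat × List Nat) (labels : List Nat),
      (∀ i ∈ is, i < n) → pvJ n st.1 labels →
    pvJ n
      ((is.foldl (fun (st : List Nat × List Nat) i =>
          (List.range' (i+1) (n - (i+1))).foldl (fun st j =>
            if manhattanA (points.getD i []) (points.getD j []) ≤ 3 then unionA st.1 st.2 i j
            else st) st) st).1)
      (is.foldl (fun (labels : List Nat) i =>
          (List.range' (i+1) (n - (i+1))).foldl (fun labels j =>
            if distB (points.getD i []) (points.getD j []) ≤ 3 then
              let li := labels.getD i 0
              let lj := labels.getD j 0
              if li ≠ lj then labels.map (fun l => if l = lj then li else l) else labels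
            else labels) labels) labels) := by
  intro is
  induction is with
  | nil => intro st labels _ hJ; exact hJ
  | cons i is ih =>
    intro st labels hmem hJ
    simp only [List.foldl_cons]
    have hi : i < n := hmem i List.mem_cons_self
    refine ih _ _ (fun i' h => hmem i' (List.mem_cons_of_mem i h)) ?_
    refine pvInner points n i (List.range' (i+1) (n - (i+1))) st labels ?_ hi hJ
    intro j hjmem
    have := List.mem_range'_1.mp hjmem
    omega

theorem pvJ_init (n : Nat) : pvJ n (List.range n) (List.range n) := by
  have hstep : ∀ z, pvStep (List.range n) z = z := by
    intro z
    by_cases hz : z < n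
    · rw [pvStep, List.getD_eq_getElem _ _ (by simpa using hz), List.getElem_range]
    · rw [pvStep, List.getD_eq_default _ _ (by simpa using hz)]
  have hroot : ∀ z, pvRoot (List.range n) z := hstep
  have hR : ∀ z r, pvR (List.range n) z r ↔ r = z := by
    intro z r
    constructor
    · rintro ⟨k, hk, -⟩
      rw [pvIter_root _ (hroot z) k] at hk
      exact hk.symm
    · rintro rfl
      exact pvR_root (hroot _)
  refine ⟨List.length_range, List.length_range, fun z hz => ?_, fun z => ⟨z, pvR_root (hroot z)⟩,
    fun z w hz hw => ?_⟩
  · show pvStep (List.range n) z < (List.range n).length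
    rw [List.length_range] at hz ⊢
    rw [hstep]; exact hz
  · have hgz : (List.range n).getD z 0 = z := by
      rw [List.getD_eq_getElem _ _ (by simpa using hz), List.getElem_range]
    have hgw : (List.range n).getD w 0 = w := by
      rw [List.getD_eq_getElem _ _ (by simpa using hw), List.getElem_range]
    rw [hgz, hgw]
    constructor
    · rintro ⟨r, hz', hw'⟩
      rw [hR] at hz' hw'
      rw [← hz', hw']
    · rintro rfl
      exact ⟨z, pvR_root (hroot z), pvR_root (hroot z)⟩

-- A's final pass: summing `i == find(parent, i)` counts the roots of the forest it started with
theorem pvCount : ∀ (is : List Nat) (acc : Int) (p : List Nat), pvBound p → pvReaches p →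
    (∀ i ∈ is, i < p.length) →
    (is.foldl (fun (acc : Int × List Nat) i =>
        let fr := findA acc.2.length acc.2 i
        (acc.1 + (if i = fr.2 then 1 else 0), fr.1)) (acc, p)).1
      = acc + ((is.filter (fun i => pvStep p i == i)).length : Int) := by
  intro is
  induction is with
  | nil => intro acc p _ _ _; simp
  | cons i is ih =>
    intro acc p hB hRe hmem
    have hi : i < p.length := hmem i List.mem_cons_self
    obtain ⟨hlen, hB', hRe', hiff, hRr⟩ :=
      findA_spec p.length p i hB hRe hi (pv_minchain hB hRe hi)
    simp only [List.foldl_cons]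
    show (is.foldl _ (acc + (if i = (findA p.length p i).2 then 1 else 0), (findA p.length p i).1)).1 = _
    rw [ih _ _ hB' hRe' (fun j hj => by rw [hlen]; exact hmem j (List.mem_cons_of_mem i hj))]
    have hfilter : is.filter (fun j => pvStep (findA p.length p i).1 j == j)
        = is.filter (fun j => pvStep p j == j) := by
      apply List.filter_congr
      intro j _
      have hio : pvRoot (findA p.length p i).1 j ↔ pvRoot p j := by
        rw [← pvR_self_iff, ← pvR_self_iff]
        exact hiff j j
      by_cases h : pvStep p j = j
      · rw [beq_iff_eq.mpr (hio.mpr h), beq_iff_eq.mpr h]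
      · rw [beq_eq_false_iff_ne.mpr (fun hh => h (hio.mp hh)), beq_eq_false_iff_ne.mpr h]
    rw [hfilter]
    have hroot_iff : i = (findA p.length p i).2 ↔ pvRoot p i := by
      constructor
      · intro h
        have h' := hRr
        rw [← h] at h'
        exact pvR_self_iff.mp h'
      · intro h
        exact (pvR_unique hRr (pvR_root h)).symm
    by_cases hri : pvRoot p i
    · rw [if_pos (hroot_iff.mpr hri), List.filter_cons_of_pos (by simpa [beq_iff_eq] using hri)]
      simp only [List.length_cons]
      push_cast
      ring
    · rw [if_neg (fun h => hri (hroot_iff.mp h)),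
        List.filter_cons_of_neg (by simpa [beq_iff_eq] using hri)]
      ring

-- roots of the forest ↔ distinct labels: same count
theorem pvCountEq (n : Nat) (p labels : List Nat) (hJ : pvJ n p labels) :
    ((List.range n).filter (fun i => pvStep p i == i)).length
      = (PySem.Set.ofList labels).length := by
  obtain ⟨hpl, hll, hB, hRe, hinv⟩ := hJ
  have hnodupS : ((List.range n).filter (fun i => pvStep p i == i)).Nodup :=
    (List.nodup_range).filter _
  have hnodupL : (PySem.Set.ofList labels).Nodup := PySem.Set.nodup_ofList labels
  rw [← List.toFinset_card_of_nodup hnodupS, ← List.toFinset_card_of_nodup hnodupL]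
  have hmemS : ∀ i, i ∈ ((List.range n).filter (fun i => pvStep p i == i)).toFinset
      ↔ (i < n ∧ pvRoot p i) := by
    intro i
    simp [List.mem_range, beq_iff_eq, pvRoot]
  have hmemL : ∀ v, v ∈ (PySem.Set.ofList labels).toFinset ↔ v ∈ labels := by
    intro v
    rw [List.mem_toFinset, PySem.Set.mem_ofList]
  apply Finset.card_bij (fun i _ => labels.getD i 0)
  · intro i hi
    obtain ⟨hin, -⟩ := (hmemS i).mp hi
    rw [hmemL, List.getD_eq_getElem _ _ (by rw [hll]; exact hin)]
    exact List.getElem_mem _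
  · intro i hi j hj heq
    obtain ⟨hin, hir⟩ := (hmemS i).mp hi
    obtain ⟨hjn, hjr⟩ := (hmemS j).mp hj
    have := (hinv i j hin hjn).mpr heq
    obtain ⟨r, hri, hrj⟩ := this
    rw [← pvR_unique hri (pvR_root hir), ← pvR_unique hrj (pvR_root hjr)]
  · intro v hv
    rw [hmemL] at hv
    obtain ⟨z, hz, hzv⟩ := List.mem_iff_getElem.mp hv
    rw [hll] at hz
    obtain ⟨ρ, hρ⟩ := hRe z
    have hρroot : pvRoot p ρ := by obtain ⟨-, -, h⟩ := hρ; exact h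
    have hρlt : ρ < n := by rw [← hpl]; exact pvR_lt hB (by rw [hpl]; exact hz) hρ
    refine ⟨ρ, (hmemS ρ).mpr ⟨hρlt, hρroot⟩, ?_⟩
    have hlab : labels.getD z 0 = labels.getD ρ 0 :=
      (hinv z ρ hz hρlt).mp ⟨ρ, hρ, pvR_root hρroot⟩
    rw [← hlab, List.getD_eq_getElem _ _ (by rw [hll]; exact hz), hzv]

-- ===== VERDICT (by name: the statement is the Claim_ definition above) =====
theorem part_one_spec : Claim_equal_part_one := by
  intro points _
  show part_one points = part_one_alt points
  simp only [part_one, part_one_alt]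
  have hJ := pvOuter points points.length (List.range points.length)
    (List.range points.length, List.replicate points.length 0) (List.range points.length)
    (fun i hi => List.mem_range.mp hi) (pvJ_init points.length)
  have hpl := hJ.1
  have hB := hJ.2.2.1
  have hRe := hJ.2.2.2.1
  rw [pvCount (List.range points.length) 0 _ hB hRe
    (fun i hi => by rw [hpl]; exact List.mem_range.mp hi)]
  rw [pvCountEq points.length _ _ hJ]
  simp
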